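-- pv_equiv track=rewrite | github.com/jhiltonsantos/ADS-Algoritmos-IFPI | Atividade_Fabio_06_STRING/tools_string.py | gera_usuario_iniciais
-- ===== SOURCE A (Python) =====
-- def transforma_palavra_em_maiuscula(palavra):
--     i = 0
--     nova_str = ''
--
--     while i < len(palavra):
--         letra = palavra[i]
--         if (ord(letra)>=97) and (ord(letra)<=122):
--             letra = chr(ord(letra)-32)
--             nova_str += letra
--         else:
--             nova_str += palavra[i]
--         i += 1
--
--     return nova_str
--
-- def gera_usuario_iniciais(nome):
--     i = 0
--     nome = transforma_palavra_em_maiuscula(nome)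
--     valor_usuario = nome[0]
--
--     while i <len(nome):
--         if ord(nome[i])==32:
--             valor_usuario += nome[i+1]
--         i += 1
--
--     return valor_usuario
-- ===== SOURCE B (Python) =====
-- def gera_usuario_iniciais(nome):
--     def up(c):
--         return chr(ord(c) - 32) if 'a' <= c <= 'z' else c
--     return up(nome[0]) + ''.join(up(nome[i + 1]) for i, c in enumerate(nome) if c == ' ')
-- ===== Notes on version B (the rewrite author's own statement) =====
-- stated objective: simpler
-- what changed: B fuses A's two phases into one pass: instead of first uppercasing the whole string by character-wise concatenation and then scanning it with an index while-loop, B uppercases only the characters it actually collects (the first character and each character following a space), built as a join over an enumerate comprehension.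
import Mathlib
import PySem

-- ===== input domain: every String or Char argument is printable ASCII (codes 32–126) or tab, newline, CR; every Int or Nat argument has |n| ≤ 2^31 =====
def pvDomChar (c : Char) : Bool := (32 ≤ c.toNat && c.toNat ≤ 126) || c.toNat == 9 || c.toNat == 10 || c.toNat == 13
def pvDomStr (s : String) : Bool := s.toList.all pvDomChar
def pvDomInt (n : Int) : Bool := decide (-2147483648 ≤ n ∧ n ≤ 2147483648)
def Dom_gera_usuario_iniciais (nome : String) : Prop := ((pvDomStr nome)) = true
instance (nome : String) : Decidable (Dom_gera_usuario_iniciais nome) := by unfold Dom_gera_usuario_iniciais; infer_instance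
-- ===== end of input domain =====

-- B fuses A's two phases into one pass: it uppercases only the collected characters (first char and
-- each char after a space) via a comprehension over enumerate, instead of uppercasing the whole
-- string first and then scanning it with an index while-loop; objective: simpler.

-- ===== PORT A =====
-- transforma_palavra_em_maiuscula: while-loop building nova_str by appending one char per step
def pv_transforma (palavra : List Char) : List Char :=
  palavra.foldl
    (fun nova_str letra =>
      if 97 ≤ letra.toNat ∧ letra.toNat ≤ 122 then
        nova_str ++ [Char.ofNat (letra.toNat - 32)]
      else
        nova_str ++ [letra])
    []

-- nome[0] / nome[i+1] raise IndexError where pyGet? is none; those inputs are outside Pre_ and the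
-- port returns the default ' ' there.
def gera_usuario_iniciais (nome : String) : String :=
  let n : List Char := pv_transforma nome.toList
  let valor0 : List Char := [(PySem.List.pyGet? n 0).getD ' ']
  String.mk
    ((PySem.List.pyRange 0 (n.length : Int) 1).foldl
      (fun valor i =>
        if ((PySem.List.pyGet? n i).getD ' ').toNat = 32 then
          valor ++ [(PySem.List.pyGet? n (i + 1)).getD ' ']
        else valor)
      valor0)

-- ===== PORT B =====
-- up(c): ASCII-only uppercase of a single character
def pvUp (c : Char) : Char := if 'a' ≤ c ∧ c ≤ 'z' then Char.ofNat (c.toNat - 32) else c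

-- up(nome[0]) + ''.join(up(nome[i+1]) for i, c in enumerate(nome) if c == ' ')
-- nome[0] / nome[i+1] raise IndexError where pyGet? is none; outside Pre_ the port uses default ' '.
def gera_usuario_iniciais_alt (nome : String) : String :=
  let l : List Char := nome.toList
  String.mk
    (pvUp ((PySem.List.pyGet? l 0).getD ' ') ::
      (PySem.List.enumerate l).filterMap
        (fun ic => if ic.2 = ' ' then some (pvUp ((PySem.List.pyGet? l (ic.1 + 1)).getD ' ')) else none))

-- ===== PRECONDITION & SPEC =====
-- A raises IndexError on the empty string (nome[0]) and on a string whose last character is a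
-- space (nome[i+1] past the end); exactly those inputs are excluded.  (B raises there too.)
def Pre_gera_usuario_iniciais (nome : String) : Prop :=
  nome.toList ≠ [] ∧ nome.toList.getLast? ≠ some ' '
instance (nome : String) : Decidable (Pre_gera_usuario_iniciais nome) := by
  unfold Pre_gera_usuario_iniciais; infer_instance

def pvWitness_gera_usuario_iniciais : String := "ana b"

def Spec_gera_usuario_iniciais (nome : String) (out : String) : Prop := out = gera_usuario_iniciais_alt nome
instance (nome : String) (out : String) : Decidable (Spec_gera_usuario_iniciais nome out) := by unfold Spec_gera_usuario_iniciais; infer_instance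

-- ===== CLAIM (what is proved, stated in full; the proofs are below) =====
def Claim_equal_gera_usuario_iniciais : Prop := ∀ (nome : String), Dom_gera_usuario_iniciais nome → Pre_gera_usuario_iniciais nome → Spec_gera_usuario_iniciais nome (gera_usuario_iniciais nome)

-- ===== LEMMAS AND PROOFS =====

theorem pv_le_iff (c d : Char) : c ≤ d ↔ c.toNat ≤ d.toNat := by
  change _ ↔ c.val.toNat ≤ d.val.toNat
  simp [Char.le_def, UInt32.le_iff_toNat_le]

theorem pv_cond_iff (c : Char) : (97 ≤ c.toNat ∧ c.toNat ≤ 122) ↔ ('a' ≤ c ∧ c ≤ 'z') := by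
  rw [pv_le_iff 'a' c, pv_le_iff c 'z']
  exact Iff.rfl

theorem pv_toNat_ofNat (n : Nat) (h : n < 55296) : (Char.ofNat n).toNat = n := by
  have hv : n.isValidChar := Or.inl h
  simp [Char.ofNat, hv, Char.ofNatAux, Char.toNat]

theorem pv_toNat_inj (c d : Char) (h : c.toNat = d.toNat) : c = d := by
  apply Char.ext
  exact UInt32.toNat_inj.mp h

theorem pvUp_toNat32 (c : Char) : (pvUp c).toNat = 32 ↔ c = ' ' := by
  unfold pvUp
  split_ifs with h
  · have h' := (pv_cond_iff c).mpr h
    rw [pv_toNat_ofNat (c.toNat - 32) (by omega)]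
    constructor
    · intro hx; omega
    · intro hx; subst hx; simp at h'
  · constructor
    · intro hx; exact pv_toNat_inj c ' ' hx
    · intro hx; subst hx; rfl

theorem pvUp_space : pvUp ' ' = ' ' := by decide

theorem pv_transforma_eq (l : List Char) : pv_transforma l = l.map pvUp := by
  suffices h : ∀ (l : List Char) (acc : List Char),
      l.foldl (fun nova_str letra =>
        if 97 ≤ letra.toNat ∧ letra.toNat ≤ 122 then
          nova_str ++ [Char.ofNat (letra.toNat - 32)]
        else nova_str ++ [letra]) acc = acc ++ l.map pvUp by
    simpa [pv_transforma] using h l []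
  intro l
  induction l with
  | nil => intro acc; simp
  | cons c rest ih =>
    intro acc
    simp only [List.foldl_cons, List.map_cons, ih]
    by_cases h : 97 ≤ c.toNat ∧ c.toNat ≤ 122
    · rw [if_pos h]
      have : pvUp c = Char.ofNat (c.toNat - 32) := by
        unfold pvUp; rw [if_pos ((pv_cond_iff c).mp h)]
      simp [this]
    · rw [if_neg h]
      have : pvUp c = c := by
        unfold pvUp; rw [if_neg (fun hc => h ((pv_cond_iff c).mpr hc))]
      simp [this]

-- pyGet? commutes with map (same index arithmetic, mapped default fixed by pvUp_space)
theorem pv_getD_map (l : List Char) (i : Int) :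
    (PySem.List.pyGet? (l.map pvUp) i).getD ' ' = pvUp ((PySem.List.pyGet? l i).getD ' ') := by
  simp only [PySem.List.pyGet?, List.length_map]
  cases h : PySem.List.pyIdx? l.length i with
  | none => simp [pvUp_space]
  | some k =>
    simp only [Option.bind_some, List.getElem?_map]
    cases h2 : l[k]? <;> simp [pvUp_space]

theorem pv_fold_eq (l : List Char) :
    ∀ (m k : Nat) (acc : List Char), l.length - k = m → k ≤ l.length →
    (PySem.List.pyRange ((k : Nat) : Int) ((l.map pvUp).length : Int) 1).foldl
      (fun valor i =>
        if ((PySem.List.pyGet? (l.map pvUp) i).getD ' ').toNat = 32 then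
          valor ++ [(PySem.List.pyGet? (l.map pvUp) (i + 1)).getD ' ']
        else valor) acc
    = acc ++ (PySem.List.enumerate (l.drop k) ((k : Nat) : Int)).filterMap
        (fun ic => if ic.2 = ' ' then some (pvUp ((PySem.List.pyGet? l (ic.1 + 1)).getD ' ')) else none) := by
  intro m
  induction m with
  | zero =>
    intro k acc h hk
    have hk' : k = l.length := by omega
    subst hk'
    rw [List.length_map, PySem.List.pyRange_one_eq_nil (le_refl _), List.drop_length,
      PySem.List.enumerate_nil]
    simp
  | succ m ih =>
    intro k acc h hk
    have hklt : k < l.length := by omega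
    rw [List.length_map, PySem.List.pyRange_one_cons (by exact_mod_cast hklt),
      List.drop_eq_getElem_cons hklt, PySem.List.enumerate_cons]
    simp only [List.foldl_cons, List.filterMap_cons]
    have hget : (PySem.List.pyGet? l (k : Int)).getD ' ' = l[k] := by
      rw [PySem.List.pyGet?_natCast, List.getElem?_eq_getElem hklt]; rfl
    have hA : ((PySem.List.pyGet? (l.map pvUp) (k : Int)).getD ' ').toNat = 32 ↔ l[k] = ' ' := by
      rw [pv_getD_map, hget, pvUp_toNat32]
    have hcast : ((k : Nat) : Int) + 1 = (((k + 1 : Nat)) : Int) := by push_cast; ring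
    rw [← List.length_map (as := l) (f := pvUp)] at hklt ⊢
    by_cases hsp : l[k] = ' '
    · rw [if_pos (hA.mpr hsp), if_pos hsp]
      rw [hcast]
      rw [List.length_map] at hklt
      have hih := ih (k + 1)
        (acc ++ [(PySem.List.pyGet? (l.map pvUp) (((k + 1 : Nat)) : Int)).getD ' '])
        (by omega) (by omega)
      rw [hih, pv_getD_map, List.append_assoc]
      simp
    · rw [if_neg (fun hc => hsp (hA.mp hc)), if_neg hsp]
      rw [hcast]
      rw [List.length_map] at hklt
      have hih := ih (k + 1) acc (by omega) (by omega)
      rw [hih]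

theorem pv_main (nome : String) : gera_usuario_iniciais nome = gera_usuario_iniciais_alt nome := by
  unfold gera_usuario_iniciais gera_usuario_iniciais_alt
  dsimp only
  rw [pv_transforma_eq]
  have h0 : (0 : Int) = ((0 : Nat) : Int) := rfl
  rw [h0, pv_fold_eq nome.toList nome.toList.length 0
    [(PySem.List.pyGet? (nome.toList.map pvUp) ((0 : Nat) : Int)).getD ' '] (by omega) (by omega)]
  rw [List.drop_zero, pv_getD_map]
  simp

-- ===== VERDICT (by name: the statement is the Claim_ definition above) =====
theorem gera_usuario_iniciais_spec : Claim_equal_gera_usuario_iniciais := by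
  intro nome _ _
  unfold Spec_gera_usuario_iniciais
  exact pv_main nome
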